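-- pv_equiv track=rewrite | github.com/madebylock/universal-quantum-seed-js | tools/compile-crypto-js.py | brace_depth
-- ===== SOURCE A (Python) =====
-- def brace_depth(line):
--     """Net bracket depth change in a line."""
--     d = 0
--     for ch in line:
--         if ch in "{[(":
--             d += 1
--         elif ch in "}])":
--             d -= 1
--     return d
-- ===== SOURCE B (Python) =====
-- def brace_depth(line):
--     """Net bracket depth change in a line."""
--     opens = sum(line.count(c) for c in "{[(")
--     closes = sum(line.count(c) for c in "}])")
--     return opens - closes
-- ===== Notes on version B (the rewrite author's own statement) =====
-- stated objective: idiomatic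
-- what changed: Replaces the single branching +1/-1 character loop with six independent str.count scans: total openings and total closings are computed separately and subtracted.
import Mathlib
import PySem

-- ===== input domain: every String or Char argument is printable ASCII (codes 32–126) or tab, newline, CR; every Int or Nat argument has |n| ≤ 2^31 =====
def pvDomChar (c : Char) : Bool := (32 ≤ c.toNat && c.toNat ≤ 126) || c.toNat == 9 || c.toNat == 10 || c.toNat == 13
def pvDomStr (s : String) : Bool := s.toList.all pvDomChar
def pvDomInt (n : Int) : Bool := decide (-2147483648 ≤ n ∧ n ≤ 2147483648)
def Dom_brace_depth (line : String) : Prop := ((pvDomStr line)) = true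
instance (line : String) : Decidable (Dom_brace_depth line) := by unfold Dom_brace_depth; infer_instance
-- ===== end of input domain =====

-- B replaces A's single branching +1/-1 loop by separate str.count passes per bracket
-- character, subtracting total closings from total openings (idiomatic, same cost).

-- ===== PORT A =====
def brace_depth (line : String) : Int :=
  line.toList.foldl (fun d ch =>
    if PySem.Str.isIn (String.ofList [ch]) "{[(" then d + 1
    else if PySem.Str.isIn (String.ofList [ch]) "}])" then d - 1
    else d) 0

-- ===== PORT B =====
def brace_depth_alt (line : String) : Int :=
  ("{[(".toList.map (fun c => (PySem.Str.count line (String.ofList [c]) : Int))).sum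
    - ("}])".toList.map (fun c => (PySem.Str.count line (String.ofList [c]) : Int))).sum

-- ===== PRECONDITION & SPEC =====
def Spec_brace_depth (line : String) (out : Int) : Prop := out = brace_depth_alt line
instance (line : String) (out : Int) : Decidable (Spec_brace_depth line out) := by unfold Spec_brace_depth; infer_instance

-- ===== CLAIM (what is proved, stated in full; the proofs are below) =====
def Claim_equal_brace_depth : Prop := ∀ (line : String), Dom_brace_depth line → Spec_brace_depth line (brace_depth line)

-- ===== LEMMAS AND PROOFS =====

-- 'sub in s' for a one-character sub is just membership
theorem isIn_singleton (c : Char) (s : List Char) : PySem.Chars.isIn [c] s = s.contains c := by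
  rw [Bool.eq_iff_iff]
  simp [PySem.Chars.isIn_iff_infix, List.singleton_infix_iff]

-- str.count of a one-character substring is List.count
theorem count_go_singleton (c : Char) : ∀ (s : List Char) (fuel acc : Nat), s.length ≤ fuel →
    PySem.Chars.count.go [c] fuel s acc = acc + s.count c
  | [], fuel, _, _ => by cases fuel <;> simp [PySem.Chars.count.go]
  | h :: t, fuel, acc, hf => by
      cases fuel with
      | zero => simp at hf
      | succ f =>
        have ht : t.length ≤ f := by simpa using hf
        unfold PySem.Chars.count.go
        by_cases hc : c = h
        · subst hc
          simp [count_go_singleton c t f (acc + 1) ht]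
          omega
        · have hp : ¬ ([c] <+: h :: t) := by simp [List.prefix_cons_iff, hc]
          simp [hp, count_go_singleton c t f acc ht, Ne.symm hc]

theorem count_singleton (s : List Char) (c : Char) : PySem.Chars.count s [c] = s.count c := by
  simp [PySem.Chars.count, count_go_singleton c s s.length 0 le_rfl]

-- A's loop computes opens − closes
theorem brace_loop : ∀ (cs : List Char) (d : Int),
    cs.foldl (fun d ch =>
      if PySem.Str.isIn (String.ofList [ch]) "{[(" then d + 1
      else if PySem.Str.isIn (String.ofList [ch]) "}])" then d - 1
      else d) d
    = d + ((cs.count '{' : Int) + cs.count '[' + cs.count '(')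
        - ((cs.count '}' : Int) + cs.count ']' + cs.count ')')
  | [], d => by simp
  | ch :: t, d => by
      rw [List.foldl_cons]
      by_cases h1 : ch ∈ ("{[(".toList)
      · have hb : PySem.Str.isIn (String.ofList [ch]) "{[(" = true := by
          simp [isIn_singleton]; simpa using h1
        simp only [hb, if_true]
        rw [brace_loop t]
        have h1' : ch = '{' ∨ ch = '[' ∨ ch = '(' := by simpa using h1
        rcases h1' with rfl | rfl | rfl <;> simp <;> ring
      · by_cases h2 : ch ∈ ("}])".toList)
        · have hb : PySem.Str.isIn (String.ofList [ch]) "{[(" = false := by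
            simp [isIn_singleton]; simpa using h1
          have hc : PySem.Str.isIn (String.ofList [ch]) "}])" = true := by
            simp [isIn_singleton]; simpa using h2
          simp only [hb, hc, Bool.false_eq_true, if_false, if_true]
          rw [brace_loop t]
          have h2' : ch = '}' ∨ ch = ']' ∨ ch = ')' := by simpa using h2
          rcases h2' with rfl | rfl | rfl <;> simp <;> ring
        · have hb : PySem.Str.isIn (String.ofList [ch]) "{[(" = false := by
            simp [isIn_singleton]; simpa using h1
          have hc : PySem.Str.isIn (String.ofList [ch]) "}])" = false := by
            simp [isIn_singleton]; simpa using h2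
          simp only [hb, hc, Bool.false_eq_true, if_false]
          rw [brace_loop t]
          have n1 : ch ≠ '{' ∧ ch ≠ '[' ∧ ch ≠ '(' := by simpa using h1
          have n2 : ch ≠ '}' ∧ ch ≠ ']' ∧ ch ≠ ')' := by simpa using h2
          simp [n1.1, n1.2.1, n1.2.2, n2.1, n2.2.1, n2.2.2]

-- ===== VERDICT (by name: the statement is the Claim_ definition above) =====
theorem brace_depth_spec : Claim_equal_brace_depth := by
  intro line _
  unfold Spec_brace_depth brace_depth brace_depth_alt
  rw [brace_loop]
  simp [PySem.Str.count, count_singleton]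
  ring
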